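-- pv_equiv track=rewrite | github.com/gzqichang/camel-store-api | packages/qapi/qapi/utils.py | secret_string
-- ===== SOURCE A (Python) =====
-- def secret_string(s, total=11, head=3, tail=3):
--     """ 针对敏感信息进行加密 """
--     if not s:
--         return s
--     while len(s) < total:
--         s += s
--     assert total > head and total > tail, '`head` and `tail` must be less than `total`'
--     head_str = s[:head]
--     tail_str = s[-tail:]
--     return head_str + '*' * (total - head - tail) + tail_str
-- ===== SOURCE B (Python) =====
-- def secret_string(s, total=11, head=3, tail=3):
--     """ Mask a string, keeping head/tail and starring the middle.
--     Instead of A's repeated `s += s` doubling loop, pad (when needed) in one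
--     step with a closed-form ceil-division repetition count. """
--     if not s:
--         return s
--     assert total > head and total > tail, '`head` and `tail` must be less than `total`'
--     if len(s) < total:
--         s = s * (-(-total // len(s)))
--     return s[:head] + '*' * (total - head - tail) + s[-tail:]
-- ===== Notes on version B (the rewrite author's own statement) =====
-- stated objective: simpler
-- what changed: The while-loop that repeatedly doubles the string until it reaches `total` is replaced by a single closed-form repetition s * ceil(total/len(s)) (ceil via -(-total//len(s))), applied only when padding is needed; Pre_ excludes inputs where the assert raises and inputs where padding occurs with head < 0 or tail <= 0, on which the negative/zero slice bound reads the internally padded string, whose length (doubling vs minimal repetition) is an implementation accident so neither value is canonical.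
-- outside the precondition, e.g. on secret_string('ab', 5, -1, 2): A returns 'abababa****ab', B returns 'ababa****ab'; on secret_string('a', 3, 0, 0): A returns '***aaaa', B returns '***aaa'
import Mathlib
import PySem

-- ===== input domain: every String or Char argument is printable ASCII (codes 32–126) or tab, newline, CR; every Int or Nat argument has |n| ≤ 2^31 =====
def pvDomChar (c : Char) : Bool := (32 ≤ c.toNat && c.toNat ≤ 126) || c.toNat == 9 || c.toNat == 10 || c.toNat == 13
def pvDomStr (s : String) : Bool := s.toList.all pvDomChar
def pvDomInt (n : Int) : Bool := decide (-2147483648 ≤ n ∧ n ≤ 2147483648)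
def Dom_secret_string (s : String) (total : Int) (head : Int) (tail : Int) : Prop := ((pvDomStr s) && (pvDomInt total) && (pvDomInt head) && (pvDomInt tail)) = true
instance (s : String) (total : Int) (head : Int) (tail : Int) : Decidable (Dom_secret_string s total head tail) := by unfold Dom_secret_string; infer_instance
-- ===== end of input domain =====

-- B replaces A's `while len(s) < total: s += s` doubling loop by a single closed-form
-- repetition `s * ceil(total/len(s))` applied only when padding is needed (objective: simpler).

-- ===== PORT A =====
-- the `while len(s) < total: s += s` loop (s nonempty, so the length strictly grows)
def padA (t : List Char) (total : Int) : List Char :=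
  if _h : 0 < t.length ∧ (t.length : Int) < total then padA (t ++ t) total else t
termination_by (total - t.length).toNat
decreasing_by simp only [List.length_append]; omega

def secret_string (s : String) (total : Int) (head : Int) (tail : Int) : String :=
  if s.toList = [] then s  -- `if not s: return s`
  else
    let t := padA s.toList total
    -- (assert passes on every input admitted by Pre_)
    let head_str := PySem.List.slice t none (some head)        -- s[:head]
    let tail_str := PySem.List.slice t (some (-tail)) none     -- s[-tail:]
    String.ofList (head_str ++ PySem.List.pyRepeat ['*'] (total - head - tail) ++ tail_str)

-- ===== PORT B =====
def secret_string_alt (s : String) (total : Int) (head : Int) (tail : Int) : String :=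
  if s.toList = [] then s  -- `if not s: return s`
  else
    -- (assert passes on every input admitted by Pre_)
    let t0 := s.toList
    let t := if (t0.length : Int) < total
             then PySem.List.pyRepeat t0 (-(PySem.Int.floordiv (-total) (t0.length : Int)))  -- s * (-(-total // len(s)))
             else t0
    String.ofList (PySem.List.slice t none (some head)
               ++ PySem.List.pyRepeat ['*'] (total - head - tail)
               ++ PySem.List.slice t (some (-tail)) none)

-- ===== PRECONDITION & SPEC =====
-- Pre_ excludes (a) inputs where A's assert raises (total ≤ head or total ≤ tail, with s nonempty),
-- and (b) inputs where padding occurs and head < 0 or tail ≤ 0: there A still returns, but the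
-- negative/zero slice bound reads the internally padded string, whose length (power-of-2 doubling
-- in A vs minimal repetition in B) is an implementation accident, so neither value is canonical.
def Pre_secret_string (s : String) (total : Int) (head : Int) (tail : Int) : Prop :=
  s = "" ∨ (head < total ∧ tail < total ∧ ((s.toList.length : Int) < total → 0 ≤ head ∧ 1 ≤ tail))
instance (s : String) (total : Int) (head : Int) (tail : Int) : Decidable (Pre_secret_string s total head tail) := by unfold Pre_secret_string; infer_instance

def pvWitness_secret_string : String × Int × Int × Int := ("secret@mail", 11, 3, 3)

def Spec_secret_string (s : String) (total : Int) (head : Int) (tail : Int) (out : String) : Prop := out = secret_string_alt s total head tail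
instance (s : String) (total : Int) (head : Int) (tail : Int) (out : String) : Decidable (Spec_secret_string s total head tail out) := by unfold Spec_secret_string; infer_instance

-- ===== CLAIM (what is proved, stated in full; the proofs are below) =====
def Claim_equal_secret_string : Prop := ∀ (s : String) (total : Int) (head : Int) (tail : Int), Dom_secret_string s total head tail → Pre_secret_string s total head tail → Spec_secret_string s total head tail (secret_string s total head tail)

-- ===== LEMMAS AND PROOFS =====


theorem pv_length_rep (m : Nat) (t : List Char) :
    (List.replicate m t).flatten.length = m * t.length := by
  simp [List.length_flatten, List.map_replicate, List.sum_replicate]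

theorem pv_rep_add (a b : Nat) (t : List Char) :
    (List.replicate (a + b) t).flatten = (List.replicate a t).flatten ++ (List.replicate b t).flatten := by
  rw [List.replicate_add, List.flatten_append]

-- the doubling loop produces a whole-number repetition of t of length ≥ total
theorem padA_rep (t : List Char) (total : Int) (ht : 0 < t.length) (k : Nat) (hk : 0 < k) :
    ∃ m : Nat, 0 < m ∧ (total : Int) ≤ (m * t.length : Nat) ∧
      padA ((List.replicate k t).flatten) total = (List.replicate m t).flatten := by
  by_cases hc : ((List.replicate k t).flatten.length : Int) < total
  · rw [padA, dif_pos ⟨by rw [pv_length_rep]; positivity, hc⟩, ← pv_rep_add]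
    exact padA_rep t total ht (k + k) (by omega)
  · refine ⟨k, hk, ?_, by rw [padA, dif_neg (fun h => hc h.2)]⟩
    rw [pv_length_rep] at hc; omega
termination_by (total - (k * t.length : Nat)).toNat
decreasing_by
  rw [pv_length_rep] at hc
  have hlt : k * t.length < (k + k) * t.length := by
    exact Nat.mul_lt_mul_of_lt_of_le (by omega) (le_refl _) ht
  set p := k * t.length
  set q := (k + k) * t.length
  omega

-- prefixes of a repetition of t depend only on t once long enough
theorem pv_take_rep_le (t : List Char) (h a b : Nat) (hab : a ≤ b) (ha : h ≤ a * t.length) :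
    ((List.replicate a t).flatten).take h = ((List.replicate b t).flatten).take h := by
  rw [show b = a + (b - a) by omega, pv_rep_add,
    List.take_append_of_le_length (by rw [pv_length_rep]; exact ha)]

theorem pv_take_rep (t : List Char) (h a b : Nat)
    (ha : h ≤ a * t.length) (hb : h ≤ b * t.length) :
    ((List.replicate a t).flatten).take h = ((List.replicate b t).flatten).take h := by
  rcases le_total a b with hab | hab
  · exact pv_take_rep_le t h a b hab ha
  · exact (pv_take_rep_le t h b a hab hb).symm

-- suffixes of a repetition of t depend only on t once long enough
theorem pv_drop_rep_le (t : List Char) (k a b : Nat) (hab : a ≤ b) (ha : k ≤ a * t.length) :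
    ((List.replicate a t).flatten).drop (a * t.length - k)
      = ((List.replicate b t).flatten).drop (b * t.length - k) := by
  have hsum : (b - a) * t.length + a * t.length = b * t.length := by
    rw [← Nat.add_mul, Nat.sub_add_cancel hab]
  rw [show b = (b - a) + a by omega, pv_rep_add, List.drop_append, pv_length_rep]
  rw [show (b - a + a) * t.length = (b - a) * t.length + a * t.length by rw [Nat.add_mul]]
  have h1 : (List.replicate (b - a) t).flatten.drop ((b - a) * t.length + a * t.length - k) = [] := by
    apply List.drop_eq_nil_of_le
    rw [pv_length_rep]
    set p := (b - a) * t.length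
    set q := a * t.length
    omega
  rw [h1, List.nil_append]
  congr 1
  set p := (b - a) * t.length
  set q := a * t.length
  omega

theorem pv_drop_rep (t : List Char) (k a b : Nat)
    (ha : k ≤ a * t.length) (hb : k ≤ b * t.length) :
    ((List.replicate a t).flatten).drop (a * t.length - k)
      = ((List.replicate b t).flatten).drop (b * t.length - k) := by
  rcases le_total a b with hab | hab
  · exact pv_drop_rep_le t k a b hab ha
  · exact (pv_drop_rep_le t k b a hab hb).symm

-- ===== VERDICT (by name: the statement is the Claim_ definition above) =====
theorem secret_string_spec : Claim_equal_secret_string := by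
  intro s total head tail _ hpre
  unfold Spec_secret_string secret_string secret_string_alt
  by_cases hs : s.toList = []
  · simp [hs]
  · simp only [hs, ite_false]
    rcases hpre with h0 | ⟨hh, htl, hcond⟩
    · exact absurd (by simp [h0]) hs
    set t := s.toList with hts
    have ht : 0 < t.length := List.length_pos_iff.mpr hs
    by_cases hlt : (t.length : Int) < total
    · obtain ⟨hh0, ht1⟩ := hcond hlt
      obtain ⟨m, hm, hmt, hA⟩ := padA_rep t total ht 1 one_pos
      rw [show (List.replicate 1 t).flatten = t by simp] at hA
      set n : Int := -(PySem.Int.floordiv (-total) (t.length : Int)) with hn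
      have hnb := (PySem.Int.neg_floordiv_neg_eq_iff_of_pos
        (a := total) (b := (t.length : Int)) (by exact_mod_cast ht)).mp hn.symm
      have hn1 : 1 ≤ n := by
        by_contra hcon
        have : n * (t.length : Int) ≤ 0 :=
          mul_nonpos_of_nonpos_of_nonneg (by omega) (by positivity)
        omega
      have hn' : ((n.toNat : Nat) : Int) = n := Int.toNat_of_nonneg (by omega)
      have htail : tail = ((tail.toNat : Nat) : Int) := (Int.toNat_of_nonneg (by omega)).symm
      have hnt : (total : Int) ≤ ((n.toNat * t.length : Nat) : Int) := by
        push_cast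
        rw [hn']
        exact hnb.2
      rw [hA, if_pos hlt]
      congr 1
      simp only [PySem.List.pyRepeat]
      rw [PySem.List.slice_to _ hh0, PySem.List.slice_to _ hh0, htail,
        PySem.List.slice_from_neg_natCast _ tail.toNat (by omega),
        PySem.List.slice_from_neg_natCast _ tail.toNat (by omega),
        pv_length_rep, pv_length_rep]
      have hhm : head.toNat ≤ m * t.length := by
        set M := m * t.length with hM
        omega
      have hhn : head.toNat ≤ n.toNat * t.length := by
        set N := n.toNat * t.length with hN
        omega
      have htm : tail.toNat ≤ m * t.length := by
        set M := m * t.length with hM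
        omega
      have htn : tail.toNat ≤ n.toNat * t.length := by
        set N := n.toNat * t.length with hN
        omega
      rw [pv_take_rep t head.toNat m n.toNat hhm hhn,
        pv_drop_rep t tail.toNat m n.toNat htm htn]
    · rw [if_neg hlt, padA, dif_neg (fun h => hlt h.2)]
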